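-- pv_equiv track=rewrite | github.com/sarzig/AI-Crossword-Solver | grid_solving/csp_and_pruning_pipeline.py | get_roots_with_shared_overlaps
-- ===== SOURCE A (Python) =====
-- def get_roots_with_shared_overlaps(possible_roots):
--     shared_roots = []
--
--     for i, (root_i, _, overlaps_i, *_) in enumerate(possible_roots):
--         for j, (root_j, _, overlaps_j, *_) in enumerate(possible_roots):
--             if i == j:
--                 continue
--             if set(overlaps_i) & set(overlaps_j):  # intersection check
--                 shared_roots.append(root_i)
--                 break  # no need to check further if one match is found
--
--     return list(set(shared_roots))  # dedupe
-- ===== SOURCE B (Python) =====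
-- def get_roots_with_shared_overlaps(possible_roots):
--     # One pass: count, for each overlap element, in how many entries it occurs
--     # (each entry counted once per distinct element).
--     count = {}
--     per_root = []
--     for root, _, overlaps, *_ in possible_roots:
--         elems = list(dict.fromkeys(overlaps))
--         per_root.append((root, elems))
--         for e in elems:
--             count[e] = count.get(e, 0) + 1
--     # Second pass: an entry shares an overlap with ANOTHER entry iff one of its
--     # elements occurs in >= 2 entries.  Dedupe names, first occurrence first.
--     seen = set()
--     out = []
--     for root, elems in per_root:
--         if root not in seen and any(count.get(e, 0) >= 2 for e in elems):
--             seen.add(root)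
--             out.append(root)
--     return out
-- ===== Notes on version B (the rewrite author's own statement) =====
-- stated objective: alternative
-- what changed: Replaces the all-pairs set-intersection scan with a single counting pass (overlap element -> number of entries containing it) plus one linear pass flagging entries that own an element with count >= 2, deduping in order.
import Mathlib
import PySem

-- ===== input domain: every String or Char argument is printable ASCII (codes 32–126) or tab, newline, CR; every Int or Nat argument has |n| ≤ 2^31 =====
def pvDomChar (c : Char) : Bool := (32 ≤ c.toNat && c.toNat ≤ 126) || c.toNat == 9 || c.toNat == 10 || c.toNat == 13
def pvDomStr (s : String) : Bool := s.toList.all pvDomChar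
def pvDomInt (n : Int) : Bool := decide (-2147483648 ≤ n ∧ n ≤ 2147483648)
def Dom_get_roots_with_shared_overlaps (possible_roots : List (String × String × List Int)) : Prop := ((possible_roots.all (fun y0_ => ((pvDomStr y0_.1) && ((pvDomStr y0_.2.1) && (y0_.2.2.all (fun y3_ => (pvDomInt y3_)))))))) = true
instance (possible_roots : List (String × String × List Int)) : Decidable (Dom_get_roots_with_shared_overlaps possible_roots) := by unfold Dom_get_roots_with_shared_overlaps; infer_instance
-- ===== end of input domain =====

-- B replaces A's all-pairs set-intersection scan by one counting pass
-- (overlap element -> number of entries containing it) plus a linear flagging pass.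
-- Python A returns list(set(...)) whose ORDER is hash-dependent; outputs are compared
-- as sets, and the ports fix first-occurrence order on both sides.

-- ===== PORT A =====
def get_roots_with_shared_overlaps (possible_roots : List (String × String × List Int)) : List String :=
  -- shared_roots: for each i, scan all j (skip i == j), append root_i and break on the
  -- first j whose overlap sets intersect; the break-on-first-hit inner loop is `any`.
  let shared_roots :=
    (PySem.List.enumerate possible_roots).foldl (fun acc p =>
      if (PySem.List.enumerate possible_roots).any (fun q =>
            q.1 != p.1 &&
            !(PySem.Set.inter (PySem.Set.ofList p.2.2.2) (PySem.Set.ofList q.2.2.2)).isEmpty)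
      then acc ++ [p.2.1] else acc) []
  PySem.Set.ofList shared_roots     -- list(set(shared_roots)), dedupe

-- ===== PORT B =====
def get_roots_with_shared_overlaps_alt (possible_roots : List (String × String × List Int)) : List String :=
  -- first loop: count[e] = count.get(e, 0) + 1 over the distinct elements of each entry,
  -- collecting per_root = [(root, elems)]
  let st := possible_roots.foldl
      (fun (s : PySem.Dict Int Int × List (String × List Int)) t =>
        let elems := PySem.List.dedup t.2.2
        (elems.foldl (fun d e => d.modify e 0 (· + 1)) s.1, s.2 ++ [(t.1, elems)]))
      (PySem.Dict.empty, [])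
  let count := st.1
  -- second loop: emit root if not seen and some element occurs in >= 2 entries
  (st.2.foldl
      (fun (s : PySem.Set String × List String) p =>
        if !(PySem.Set.contains s.1 p.1) && p.2.any (fun e => decide ((2 : Int) ≤ count.getD e 0))
        then (PySem.Set.add s.1 p.1, s.2 ++ [p.1])
        else s)
      (PySem.Set.empty, [])).2

-- ===== PRECONDITION & SPEC =====
def Spec_get_roots_with_shared_overlaps (possible_roots : List (String × String × List Int)) (out : List String) : Prop := out = get_roots_with_shared_overlaps_alt possible_roots
instance (possible_roots : List (String × String × List Int)) (out : List String) : Decidable (Spec_get_roots_with_shared_overlaps possible_roots out) := by unfold Spec_get_roots_with_shared_overlaps; infer_instance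

-- ===== CLAIM (what is proved, stated in full; the proofs are below) =====
def Claim_equal_get_roots_with_shared_overlaps : Prop := ∀ (possible_roots : List (String × String × List Int)), Dom_get_roots_with_shared_overlaps possible_roots → Spec_get_roots_with_shared_overlaps possible_roots (get_roots_with_shared_overlaps possible_roots)

-- abbreviations used only by the proofs
def pvG (t : String × String × List Int) : String × List Int := (t.1, PySem.List.dedup t.2.2)

def pvDict (L : List (String × String × List Int)) : PySem.Dict Int Int :=
  L.foldl (fun d t => (PySem.List.dedup t.2.2).foldl (fun d e => d.modify e 0 (· + 1)) d) PySem.Dict.empty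

-- the first fold of port B splits into a dict fold and the per_root map
theorem pv_fold1 (L : List (String × String × List Int)) (d : PySem.Dict Int Int)
    (acc : List (String × List Int)) :
    L.foldl (fun (s : PySem.Dict Int Int × List (String × List Int)) t =>
        ((PySem.List.dedup t.2.2).foldl (fun d e => d.modify e 0 (· + 1)) s.1,
          s.2 ++ [(t.1, PySem.List.dedup t.2.2)])) (d, acc)
    = (L.foldl (fun d t => (PySem.List.dedup t.2.2).foldl (fun d e => d.modify e 0 (· + 1)) d) d,
       acc ++ L.map pvG) := by
  induction L generalizing d acc with
  | nil => simp
  | cons t L ih =>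
    simp only [List.foldl_cons]
    rw [ih]
    simp [pvG]

theorem pv_count_dedup (o : List Int) (e : Int) :
    (PySem.List.dedup o).count e = if e ∈ o then 1 else 0 := by
  by_cases h : e ∈ o
  · rw [if_pos h]
    exact List.count_eq_one_of_mem (PySem.List.nodup_dedup o) ((PySem.List.mem_dedup o e).2 h)
  · rw [if_neg h]
    exact List.count_eq_zero.2 (fun hc => h ((PySem.List.mem_dedup o e).1 hc))

theorem pv_getD_dict (L : List (String × String × List Int)) (d : PySem.Dict Int Int) (e : Int) :
    (L.foldl (fun d t => (PySem.List.dedup t.2.2).foldl (fun d e => d.modify e 0 (· + 1)) d) d).getD e 0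
    = d.getD e 0 + (L.countP (fun t => decide (e ∈ t.2.2)) : Int) := by
  induction L generalizing d with
  | nil => simp
  | cons t L ih =>
    simp only [List.foldl_cons, ih, PySem.Dict.getD_foldl_modify_add_one, pv_count_dedup,
      List.countP_cons]
    by_cases h : e ∈ t.2.2 <;> simp [h] <;> push_cast <;> ring

theorem pv_getD_pvDict (L : List (String × String × List Int)) (e : Int) :
    (pvDict L).getD e 0 = (L.countP (fun t => decide (e ∈ t.2.2)) : Int) := by
  unfold pvDict
  rw [pv_getD_dict]
  simp

-- second fold of port B: the (seen, out) pair stays diagonal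
theorem pv_fold2 (q : String × List Int → Bool) (P : List (String × List Int)) (s : List String) :
    (P.foldl (fun (st : PySem.Set String × List String) p =>
        if !(PySem.Set.contains st.1 p.1) && q p then (PySem.Set.add st.1 p.1, st.2 ++ [p.1]) else st)
      (s, s)).2
    = P.foldl (fun s p => if q p then PySem.Set.add s p.1 else s) s := by
  induction P generalizing s with
  | nil => rfl
  | cons p P ih =>
    simp only [List.foldl_cons]
    by_cases hcond : (!(PySem.Set.contains s p.1) && q p) = true
    · have hcond' := hcond
      simp only [Bool.and_eq_true, Bool.not_eq_true'] at hcond'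
      have hadd : PySem.Set.add s p.1 = s ++ [p.1] := by
        unfold PySem.Set.add
        rw [hcond'.1]
        simp
      rw [if_pos hcond, if_pos hcond'.2, hadd]
      exact ih (s ++ [p.1])
    · rw [if_neg hcond]
      by_cases hq : q p = true
      · have hc : PySem.Set.contains s p.1 = true := by
          cases h : PySem.Set.contains s p.1
          · exact absurd (by rw [h, hq]; rfl) hcond
          · rfl
        have hadd : PySem.Set.add s p.1 = s := by
          unfold PySem.Set.add
          rw [hc]
          simp
        rw [if_pos hq, hadd]
        exact ih s
      · rw [if_neg hq]
        exact ih s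

theorem pv_fold_if_add (q : String × List Int → Bool) (P : List (String × List Int)) (s : List String) :
    P.foldl (fun s p => if q p then PySem.Set.add s p.1 else s) s
    = ((P.filter q).map (·.1)).foldl PySem.Set.add s := by
  induction P generalizing s with
  | nil => rfl
  | cons p P ih =>
    by_cases hq : q p <;> simp [hq, ih]

-- two distinct members satisfying p force countP ≥ 2
theorem pv_two_le_countP {α : Type} {l : List α} {p : α → Bool} {x y : α}
    (hx : x ∈ l) (hy : y ∈ l) (hne : x ≠ y) (hpx : p x) (hpy : p y) : 2 ≤ l.countP p := by
  have hx' : x ∈ l.filter p := List.mem_filter.2 ⟨hx, hpx⟩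
  have hy' : y ∈ l.filter p := List.mem_filter.2 ⟨hy, hpy⟩
  rw [List.countP_eq_length_filter]
  rcases h : l.filter p with _ | ⟨a, _ | ⟨b, t⟩⟩
  · rw [h] at hx'; simp at hx'
  · rw [h] at hx' hy'; simp at hx' hy'
    exact absurd (hx'.trans hy'.symm) hne
  · simp

-- a nodup list with countP ≥ 2 has a satisfying member other than x
theorem pv_exists_other {α : Type} {l : List α} {p : α → Bool} {x : α}
    (hnd : l.Nodup) (h2 : 2 ≤ l.countP p) : ∃ y ∈ l, y ≠ x ∧ p y := by
  by_contra hcon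
  push Not at hcon
  have hall : ∀ y ∈ l.filter p, y = x := by
    intro y hy
    rcases List.mem_filter.1 hy with ⟨hyl, hyp⟩
    by_contra hne
    exact absurd hyp (by simpa using hcon y hyl hne)
  rw [List.countP_eq_length_filter] at h2
  rcases h : l.filter p with _ | ⟨a, _ | ⟨b, t⟩⟩
  · rw [h] at h2; simp at h2
  · rw [h] at h2; simp at h2
  · have hnd' := hnd.filter p
    rw [h] at hnd' hall
    have ha : a = x := hall a (by simp)
    have hb : b = x := hall b (by simp)
    simp [ha, hb] at hnd'

theorem pv_enumerate_nodup (L : List (String × String × List Int)) :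
    (PySem.List.enumerate L 0).Nodup :=
  (PySem.List.pairwise_lt_enumerate L 0).imp
    (fun h => by intro he; rw [he] at h; exact lt_irrefl _ h)

theorem pv_enumerate_fst_inj (L : List (String × String × List Int))
    {p q : Int × (String × String × List Int)}
    (hp : p ∈ PySem.List.enumerate L 0) (hq : q ∈ PySem.List.enumerate L 0)
    (h : p.1 = q.1) : p = q := by
  rcases (PySem.List.mem_enumerate_iff L 0 p).1 hp with ⟨k, hk, rfl⟩
  rcases (PySem.List.mem_enumerate_iff L 0 q).1 hq with ⟨m, hm, rfl⟩
  simp only at h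
  have : k = m := by omega
  subst this; rfl

-- the heart: A's per-entry condition equals B's count-based condition
theorem pv_cond_eq (L : List (String × String × List Int))
    (p : Int × (String × String × List Int)) (hp : p ∈ PySem.List.enumerate L 0) :
    ((PySem.List.enumerate L 0).any (fun q =>
        q.1 != p.1 &&
        !(PySem.Set.inter (PySem.Set.ofList p.2.2.2) (PySem.Set.ofList q.2.2.2)).isEmpty))
    = (PySem.List.dedup p.2.2.2).any (fun e => decide ((2:Int) ≤ (pvDict L).getD e 0)) := by
  rw [← Bool.coe_iff_coe]
  have hcnt : ∀ e : Int, L.countP (fun t => decide (e ∈ t.2.2))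
      = (PySem.List.enumerate L 0).countP (fun q => decide (e ∈ q.2.2.2)) := by
    intro e
    conv_lhs => rw [← PySem.List.map_snd_enumerate L 0]
    rw [List.countP_map]
    rfl
  constructor
  · intro h
    rcases List.any_eq_true.1 h with ⟨q, hqE, hq⟩
    simp only [Bool.and_eq_true, Bool.not_eq_true'] at hq
    rcases hq with ⟨hne, hint⟩
    rcases List.isEmpty_eq_false_iff_exists_mem.1 hint with ⟨e, he⟩
    rcases (PySem.Set.mem_inter _ _ e).1 he with ⟨he1, he2⟩
    rw [PySem.Set.mem_ofList] at he1 he2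
    refine List.any_eq_true.2 ⟨e, (PySem.List.mem_dedup _ e).2 he1, ?_⟩
    rw [pv_getD_pvDict, decide_eq_true_iff]
    have hpq : p ≠ q := by
      intro hc
      rw [hc] at hne
      simp at hne
    have h2 : 2 ≤ (PySem.List.enumerate L 0).countP (fun q => decide (e ∈ q.2.2.2)) :=
      pv_two_le_countP hp hqE hpq (by simpa using he1) (by simpa using he2)
    rw [hcnt]
    exact_mod_cast h2
  · intro h
    rcases List.any_eq_true.1 h with ⟨e, heD, he⟩
    rw [pv_getD_pvDict, decide_eq_true_iff] at he
    have h2 : 2 ≤ (PySem.List.enumerate L 0).countP (fun q => decide (e ∈ q.2.2.2)) := by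
      rw [← hcnt]; exact_mod_cast he
    rcases pv_exists_other (x := p) (pv_enumerate_nodup L) h2 with ⟨q, hqE, hqne, hqp⟩
    refine List.any_eq_true.2 ⟨q, hqE, ?_⟩
    simp only [Bool.and_eq_true, Bool.not_eq_true']
    refine ⟨?_, ?_⟩
    · have h1 : q.1 ≠ p.1 := fun hc => hqne (pv_enumerate_fst_inj L hqE hp hc)
      simpa using h1
    · rw [List.isEmpty_eq_false_iff_exists_mem]
      refine ⟨e, (PySem.Set.mem_inter _ _ e).2 ⟨?_, ?_⟩⟩
      · rw [PySem.Set.mem_ofList]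
        exact (PySem.List.mem_dedup _ e).1 heD
      · rw [PySem.Set.mem_ofList]
        exact decide_eq_true_iff.1 (by simpa using hqp)

theorem pv_a_char (L : List (String × String × List Int)) :
    get_roots_with_shared_overlaps L
    = PySem.Set.ofList (((PySem.List.enumerate L 0).filter (fun p =>
        (PySem.List.enumerate L 0).any (fun q =>
          q.1 != p.1 &&
          !(PySem.Set.inter (PySem.Set.ofList p.2.2.2) (PySem.Set.ofList q.2.2.2)).isEmpty))).map
        (fun p => p.2.1)) := by
  unfold get_roots_with_shared_overlaps
  rw [PySem.List.foldl_append_if]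
  rw [List.nil_append]

theorem pv_alt_char (L : List (String × String × List Int)) :
    get_roots_with_shared_overlaps_alt L
    = PySem.Set.ofList ((L.filter (fun t =>
        (PySem.List.dedup t.2.2).any (fun e => decide ((2:Int) ≤ (pvDict L).getD e 0)))).map
        (fun t => t.1)) := by
  unfold get_roots_with_shared_overlaps_alt pvDict
  rw [pv_fold1]
  dsimp only
  rw [show (PySem.Set.empty : PySem.Set String) = ([] : List String) from rfl]
  rw [pv_fold2, pv_fold_if_add, ← PySem.Set.ofList_eq_foldl, List.nil_append]
  rw [List.filter_map, List.map_map]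
  rfl

theorem pv_filter_snd (L : List (String × String × List Int)) (q : (String × String × List Int) → Bool) :
    ((PySem.List.enumerate L 0).filter (fun p => q p.2)).map (fun p => p.2.1)
    = (L.filter q).map (fun t => t.1) := by
  conv_rhs => rw [← PySem.List.map_snd_enumerate L 0]
  rw [List.filter_map, List.map_map]
  rfl

theorem get_roots_with_shared_overlaps_spec : Claim_equal_get_roots_with_shared_overlaps := by
  intro L _hdom
  unfold Spec_get_roots_with_shared_overlaps
  rw [pv_a_char, pv_alt_char]
  congr 1
  rw [List.filter_congr (fun p hp => pv_cond_eq L p hp)]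
  exact pv_filter_snd L (fun t =>
    (PySem.List.dedup t.2.2).any (fun e => decide ((2:Int) ≤ (pvDict L).getD e 0)))
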